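-- pv_equiv track=rewrite | github.com/quic/ai-hub-models | scripts/generate_test_summary.py | extract_relevant_stack_trace
-- ===== SOURCE A (Python) =====
-- def extract_relevant_stack_trace(stack_trace: str | None, message: str) -> str | None:
--     """
--     Extract the most relevant part of a stack trace, i.e. the end of the stack trace
--     where file and line number along with error is captured.
--
--     Parameters
--     ----------
--         stack_trace: The full stack trace
--         message: The error message
--
--     Returns
--     -------
--         The most relevant part of the stack trace
--
--     This assumes the error is near the end of the stack trace, which is often but not always true, refer to junit xml for ground truth.
--     """
--     if not stack_trace:
--         return None
--
--     stack_lines = stack_trace.split("\n")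
--
--     # If the stack trace is very long, try to extract the most relevant part
--     if len(stack_lines) > 10:
--         # Look for lines that contain the error message
--         error_type = message.split(":", 1)[0]
--         error_lines = [i for i, line in enumerate(stack_lines) if error_type in line]
--
--         if error_lines:
--             # Get more lines before and a few lines after the error
--             last_error_line = error_lines[-1]
--             start_line = max(
--                 0, last_error_line - 7
--             )  # Include 7 lines before instead of 2
--             end_line = min(len(stack_lines), last_error_line + 3)
--             return "\n".join(stack_lines[start_line:end_line])
--         # If we can't find the error message, use the last several lines
--         return "\n".join(stack_lines[-10:])  # Show 10 lines instead of 5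
--     if len(stack_lines) > 5:
--         # For moderately long stack traces, use all lines
--         return stack_trace
--
--     # For short stack traces, use the whole thing
--     return stack_trace
-- ===== SOURCE B (Python) =====
-- def extract_relevant_stack_trace(stack_trace: str | None, message: str) -> str | None:
--     """Same result as A, but finds the last matching line by a backward scan
--     that stops at the first hit, instead of building the full index list."""
--     if not stack_trace:
--         return None
--     stack_lines = stack_trace.split("\n")
--     n = len(stack_lines)
--     if n <= 10:
--         return stack_trace
--     error_type = message.split(":", 1)[0]
--     for i in range(n - 1, -1, -1):
--         if error_type in stack_lines[i]:
--             return "\n".join(stack_lines[max(0, i - 7):min(n, i + 3)])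
--     return "\n".join(stack_lines[-10:])
-- ===== Notes on version B (the rewrite author's own statement) =====
-- stated objective: simpler
-- what changed: Replaces the comprehension that enumerates all lines and collects every matching index (then takes the last) with a backward scan that returns on the first (i.e. last) matching line, and collapses the two <=10-line branches into one early return.
import Mathlib
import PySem

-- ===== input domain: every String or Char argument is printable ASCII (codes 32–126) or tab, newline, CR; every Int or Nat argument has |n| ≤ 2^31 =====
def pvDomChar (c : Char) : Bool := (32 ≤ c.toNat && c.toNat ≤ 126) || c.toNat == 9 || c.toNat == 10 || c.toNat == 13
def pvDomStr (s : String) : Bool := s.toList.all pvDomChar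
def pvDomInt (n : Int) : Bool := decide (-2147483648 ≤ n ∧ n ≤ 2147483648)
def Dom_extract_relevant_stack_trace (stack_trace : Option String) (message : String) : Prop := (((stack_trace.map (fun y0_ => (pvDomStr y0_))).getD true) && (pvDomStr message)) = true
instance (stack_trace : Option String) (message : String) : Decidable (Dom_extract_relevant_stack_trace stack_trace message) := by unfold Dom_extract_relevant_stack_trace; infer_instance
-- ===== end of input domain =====

-- B replaces A's build-all-matching-indices comprehension (then index [-1]) by a backward
-- scan that stops at the last matching line, and merges the two short-trace branches (objective: simpler).

-- ===== PORT A =====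
def extract_relevant_stack_trace (stack_trace : Option String) (message : String) : Option String :=
  match stack_trace with
  | none => none
  | some st =>
    if st = "" then none
    else
      let stack_lines := (PySem.Str.split? st "\n").getD []
      if stack_lines.length > 10 then
        let error_type := ((PySem.Str.splitMax? message ":" 1).getD []).headD ""
        let error_lines := ((PySem.List.enumerate stack_lines).filter
          (fun p => PySem.Str.isIn error_type p.2)).map (·.1)
        if error_lines ≠ [] then
          match PySem.List.pyGet? error_lines (-1) with
          | some last_error_line =>
            let start_line := max 0 (last_error_line - 7)
            let end_line := min (stack_lines.length : Int) (last_error_line + 3)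
            some (PySem.Str.join "\n" (PySem.List.slice stack_lines (some start_line) (some end_line)))
          | none => none   -- unreachable: error_lines ≠ [] makes error_lines[-1] defined
        else
          some (PySem.Str.join "\n" (PySem.List.slice stack_lines (some (-10)) none))
      else if stack_lines.length > 5 then some st
      else some st

-- ===== PORT B =====
-- the 'for i in range(n-1, -1, -1): if error_type in stack_lines[i]: …' loop of Source B:
-- pvScanBack et lines i scans indices i-1, i-2, …, 0 and returns the first (= highest) matching index
def pvScanBack (et : String) (lines : List String) : Nat → Option Nat
  | 0 => none
  | i + 1 => if PySem.Str.isIn et (lines.getD i "") then some i else pvScanBack et lines i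

def extract_relevant_stack_trace_alt (stack_trace : Option String) (message : String) : Option String :=
  match stack_trace with
  | none => none
  | some st =>
    if st = "" then none
    else
      let stack_lines := (PySem.Str.split? st "\n").getD []
      let n := stack_lines.length
      if n ≤ 10 then some st
      else
        let error_type := ((PySem.Str.splitMax? message ":" 1).getD []).headD ""
        match pvScanBack error_type stack_lines n with
        | some i =>
          some (PySem.Str.join "\n" (PySem.List.slice stack_lines
            (some (max 0 ((i : Int) - 7))) (some (min (n : Int) ((i : Int) + 3)))))
        | none =>
          some (PySem.Str.join "\n" (PySem.List.slice stack_lines (some (-10)) none))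

-- ===== PRECONDITION & SPEC =====
def Spec_extract_relevant_stack_trace (stack_trace : Option String) (message : String) (out : Option String) : Prop := out = extract_relevant_stack_trace_alt stack_trace message
instance (stack_trace : Option String) (message : String) (out : Option String) : Decidable (Spec_extract_relevant_stack_trace stack_trace message out) := by unfold Spec_extract_relevant_stack_trace; infer_instance

-- ===== CLAIM (what is proved, stated in full; the proofs are below) =====
def Claim_equal_extract_relevant_stack_trace : Prop := ∀ (stack_trace : Option String) (message : String), Dom_extract_relevant_stack_trace stack_trace message → Spec_extract_relevant_stack_trace stack_trace message (extract_relevant_stack_trace stack_trace message)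

-- ===== LEMMAS AND PROOFS =====

-- xs[-1] is the last element
theorem pyGet?_neg_one {α : Type} (xs : List α) : PySem.List.pyGet? xs (-1) = xs.getLast? := by
  simp only [PySem.List.pyGet?, PySem.List.pyIdx?, Int.reduceNeg, Int.neg_nonneg, Int.reduceLE,
    ↓reduceIte, neg_le_neg_iff, Nat.one_le_cast, neg_neg, Int.toNat_one]
  split
  · rw [List.getLast?_eq_getElem?]; simp
  · next h =>
    have : xs = [] := by cases xs <;> simp_all
    simp [this]

-- the last of A's error_lines restricted to the first i lines is B's backward scan from i
theorem scanBack_eq_getLast (et : String) (lines : List String) (i : Nat) (hi : i ≤ lines.length) :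
    ((((PySem.List.enumerate lines).take i).filter (fun p => PySem.Str.isIn et p.2)).map (·.1)).getLast?
      = (pvScanBack et lines i).map (fun k => (k : Int)) := by
  induction i with
  | zero => simp [pvScanBack]
  | succ i ih =>
    have hlt : i < lines.length := by omega
    have hgd : lines.getD i "" = lines[i] := List.getD_eq_getElem lines "" hlt
    rw [List.take_add_one]
    have he : (PySem.List.enumerate lines)[i]? = some (((i : Nat) : Int), lines[i]) := by
      rw [PySem.List.getElem?_enumerate, List.getElem?_eq_getElem hlt]; simp
    rw [he]
    rw [show pvScanBack et lines (i+1)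
        = if PySem.Str.isIn et (lines.getD i "") then some i else pvScanBack et lines i from rfl, hgd]
    simp only [Option.toList_some, List.filter_append, List.map_append,
      List.filter_cons, List.filter_nil]
    cases hc : PySem.Str.isIn et lines[i] with
    | true => simp
    | false => simpa using ih (by omega)

-- ===== VERDICT (by name: the statement is the Claim_ definition above) =====
theorem extract_relevant_stack_trace_spec : Claim_equal_extract_relevant_stack_trace := by
  intro stack_trace message _
  unfold Spec_extract_relevant_stack_trace
  cases stack_trace with
  | none => rfl
  | some st =>
    simp only [extract_relevant_stack_trace, extract_relevant_stack_trace_alt]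
    by_cases hst : st = ""
    · simp [hst]
    · simp only [hst, if_false]
      set lines := (PySem.Str.split? st "\n").getD [] with hl
      by_cases hlen : lines.length > 10
      · have h10 : ¬ (lines.length ≤ 10) := by omega
        rw [if_pos hlen, if_neg h10]
        set et := ((PySem.Str.splitMax? message ":" 1).getD []).headD "" with het
        have key := scanBack_eq_getLast et lines lines.length (le_refl _)
        rw [show (PySem.List.enumerate lines).take lines.length = PySem.List.enumerate lines by
              apply List.take_of_length_le; rw [PySem.List.length_enumerate]] at key
        cases hs : pvScanBack et lines lines.length with
        | some k =>
          rw [hs] at key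
          have hne : (((PySem.List.enumerate lines).filter (fun p => PySem.Str.isIn et p.2)).map (·.1)) ≠ [] := by
            intro h; rw [h] at key; simp at key
          rw [if_pos hne, pyGet?_neg_one, key]
          simp
        | none =>
          rw [hs] at key
          have hnil : (((PySem.List.enumerate lines).filter (fun p => PySem.Str.isIn et p.2)).map (·.1)) = [] := by
            simpa [List.getLast?_eq_none_iff] using key
          rw [if_neg (not_not_intro hnil)]
      · have h10 : lines.length ≤ 10 := by omega
        rw [if_neg hlen, if_pos h10]
        split <;> rfl
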